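-- pv_equiv track=rewrite | github.com/sueszli/vector-database-benchmark | dataset/python-mutated/graph_util.py | infer_num_vertices
-- ===== SOURCE A (Python) =====
-- def infer_num_vertices(architecture):
--     if False:
--         i = 10
--         return i + 15
--     '\n    Infer number of vertices from an architecture dict.\n\n    Parameters\n    ----------\n    architecture : dict\n        Architecture in NNI format.\n\n    Returns\n    -------\n    int\n        Number of vertices.\n    '
--     op_keys = set([k for k in architecture.keys() if k.startswith('op')])
--     intermediate_vertices = len(op_keys)
--     assert op_keys == {'op{}'.format(i) for i in range(1, intermediate_vertices + 1)}
--     return intermediate_vertices + 2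
-- ===== SOURCE B (Python) =====
-- def infer_num_vertices(architecture):
--     # Probe op1, op2, ... by dict membership until the first missing key,
--     # then validate with a single count of op-prefixed keys.
--     n = 0
--     while 'op{}'.format(n + 1) in architecture:
--         n += 1
--     assert sum(1 for k in architecture if k.startswith('op')) == n
--     return n + 2
-- ===== Notes on version B (the rewrite author's own statement) =====
-- stated objective: alternative
-- what changed: B determines n by probing 'op1','op2',... with direct dict membership until the first missing key (validating against one count of op-prefixed keys), instead of materialising the op-key set and comparing it by set equality with a constructed expected set {'op1'..'opn'}.
import Mathlib
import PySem

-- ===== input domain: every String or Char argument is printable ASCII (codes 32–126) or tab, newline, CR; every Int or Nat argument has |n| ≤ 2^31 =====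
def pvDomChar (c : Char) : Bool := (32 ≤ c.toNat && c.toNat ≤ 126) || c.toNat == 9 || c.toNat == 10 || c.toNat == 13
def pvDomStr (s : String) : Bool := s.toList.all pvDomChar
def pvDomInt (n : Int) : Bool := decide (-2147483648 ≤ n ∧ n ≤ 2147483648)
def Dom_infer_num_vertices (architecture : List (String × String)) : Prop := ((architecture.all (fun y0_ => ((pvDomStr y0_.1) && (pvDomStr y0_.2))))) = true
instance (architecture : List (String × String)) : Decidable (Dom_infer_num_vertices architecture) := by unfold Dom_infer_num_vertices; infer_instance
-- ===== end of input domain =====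

-- B finds n by probing 'op1','op2',… with dict membership until the first missing key instead of
-- comparing the op-key set with a constructed expected set; equivalence is about the return value
-- (on inputs where A's assert fails both Pythons raise AssertionError; those are outside Pre_).

-- 'op{}'.format(i): ported through String.ofList over the characters (exact for string concatenation;
-- Lean's own String.append is opaque to the kernel)
def pvOpKey (i : Int) : String := String.ofList ('o' :: 'p' :: PySem.Int.toChars i)

-- ===== PORT A =====
def infer_num_vertices (architecture : List (String × String)) : Int :=
  -- op_keys = set([k for k in architecture.keys() if k.startswith('op')])
  let op_keys : PySem.Set String :=
    PySem.Set.ofList (((PySem.Dict.ofList architecture).keys).filter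
      (fun k => PySem.Str.startswith k "op"))
  -- intermediate_vertices = len(op_keys)
  let intermediate_vertices : Int := PySem.Set.len op_keys
  -- the assert (op_keys == {'op{}'.format(i) for i in range(1, n+1)}) passes on every input of
  -- Pre_infer_num_vertices; where it fails Python raises AssertionError (excluded by Pre_)
  intermediate_vertices + 2

-- ===== PORT B =====
-- while 'op{}'.format(n + 1) in architecture: n += 1
-- (fuel d.size bounds the loop exactly: each successful probe hits a distinct key of the dict)
def pvProbeOps (d : PySem.Dict String String) : Nat → Nat → Nat
  | 0, n => n
  | fuel+1, n =>
      if d.contains (pvOpKey ((n : Int) + 1)) then pvProbeOps d fuel (n + 1) else n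

def infer_num_vertices_alt (architecture : List (String × String)) : Int :=
  let d := PySem.Dict.ofList architecture
  let n := pvProbeOps d d.size 0
  -- the assert (sum(1 for k in architecture if k.startswith('op')) == n) passes on every input of
  -- Pre_infer_num_vertices; where it fails Python raises AssertionError (excluded by Pre_)
  (n : Int) + 2

-- ===== PRECONDITION & SPEC =====
-- Exactly the inputs on which A (and B) return normally: every op-prefixed key is one of
-- 'op1'..'opn' where n is the number of op-prefixed keys; elsewhere both raise AssertionError.
def Pre_infer_num_vertices (architecture : List (String × String)) : Prop :=
  ∀ k ∈ (PySem.Dict.ofList architecture).keys, PySem.Str.startswith k "op" = true →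
    ∃ i ∈ List.range (((PySem.Dict.ofList architecture).keys).filter
        (fun k => PySem.Str.startswith k "op")).length,
      k = pvOpKey ((i : Int) + 1)
instance (architecture : List (String × String)) : Decidable (Pre_infer_num_vertices architecture) := by
  unfold Pre_infer_num_vertices; infer_instance

def pvWitness_infer_num_vertices : (List (String × String)) :=
  [("op1", "conv"), ("op2", "pool"), ("input", "x")]

def Spec_infer_num_vertices (architecture : List (String × String)) (out : Int) : Prop := out = infer_num_vertices_alt architecture
instance (architecture : List (String × String)) (out : Int) : Decidable (Spec_infer_num_vertices architecture out) := by unfold Spec_infer_num_vertices; infer_instance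

-- ===== CLAIM (what is proved, stated in full; the proofs are below) =====
def Claim_equal_infer_num_vertices : Prop := ∀ (architecture : List (String × String)), Dom_infer_num_vertices architecture → Pre_infer_num_vertices architecture → Spec_infer_num_vertices architecture (infer_num_vertices architecture)

-- ===== LEMMAS AND PROOFS =====

lemma pv_digitChar_val {d : Nat} (h : d < 10) : (Nat.digitChar d).toNat - 48 = d := by
  interval_cases d <;> decide

lemma pv_toDigitsCore_eq : ∀ (fuel n : Nat) (acc : List Char), 0 < n → n ≤ fuel →
    Nat.toDigitsCore 10 fuel n acc = ((Nat.digits 10 n).map Nat.digitChar).reverse ++ acc := by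
  intro fuel
  induction fuel with
  | zero => intro n acc h1 h2; omega
  | succ fuel ih =>
      intro n acc h1 h2
      rw [Nat.toDigitsCore, Nat.digits_def' (by norm_num : 1 < 10) h1]
      by_cases h : n / 10 = 0
      · have hnil : Nat.digits 10 (n / 10) = [] := by rw [h]; simp
        simp [h]
      · have hlt : n / 10 < n := Nat.div_lt_self h1 (by norm_num)
        rw [if_neg h, ih (n / 10) _ (Nat.pos_of_ne_zero h) (by omega)]
        simp

lemma pv_toDigits_inj {a b : Nat} (ha : 0 < a) (hb : 0 < b)
    (h : Nat.toDigits 10 a = Nat.toDigits 10 b) : a = b := by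
  unfold Nat.toDigits at h
  rw [pv_toDigitsCore_eq _ _ _ ha (by omega), pv_toDigitsCore_eq _ _ _ hb (by omega)] at h
  simp only [List.append_nil, List.reverse_inj] at h
  have h2 := congrArg (List.map (fun c : Char => c.toNat - 48)) h
  have hid : ∀ m : Nat, ((Nat.digits 10 m).map Nat.digitChar).map (fun c : Char => c.toNat - 48)
      = Nat.digits 10 m := by
    intro m
    conv_rhs => rw [← List.map_id (Nat.digits 10 m)]
    rw [List.map_map]
    apply List.map_congr_left
    intro d hd
    have hlt := Nat.digits_lt_base (by norm_num) hd
    show (Nat.digitChar d).toNat - 48 = d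
    exact pv_digitChar_val hlt
  rw [hid, hid] at h2
  have h3 := congrArg (Nat.ofDigits 10) h2
  simpa [Nat.ofDigits_digits] using h3

lemma pv_opKey_inj {i j : Nat} (h : pvOpKey ((i : Int) + 1) = pvOpKey ((j : Int) + 1)) : i = j := by
  unfold pvOpKey at h
  have h2 := String.ofList_inj.mp h
  simp only [List.cons.injEq, true_and] at h2
  unfold PySem.Int.toChars at h2
  have hi : ¬ ((i : Int) + 1 < 0) := by omega
  have hj : ¬ ((j : Int) + 1 < 0) := by omega
  rw [if_neg hi, if_neg hj] at h2
  have hti : ((i : Int) + 1).toNat = i + 1 := by omega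
  have htj : ((j : Int) + 1).toNat = j + 1 := by omega
  rw [hti, htj] at h2
  have := pv_toDigits_inj (Nat.succ_pos i) (Nat.succ_pos j) h2
  omega

lemma pv_opKey_startswith (i : Int) : PySem.Str.startswith (pvOpKey i) "op" = true := by
  simp [pvOpKey, PySem.Str.startswith_eq]
  rw [PySem.Chars.startswith_iff]
  exact ⟨PySem.Int.toChars i, by simp⟩

lemma pv_probe_eq (d : PySem.Dict String String) (N : Nat)
    (hcont : ∀ j : Nat, j < N → d.contains (pvOpKey ((j : Nat) + 1 : Int)) = true)
    (hstop : d.contains (pvOpKey ((N : Nat) + 1 : Int)) = false) :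
    ∀ (fuel m : Nat), m ≤ N → N ≤ m + fuel → pvProbeOps d fuel m = N := by
  intro fuel
  induction fuel with
  | zero => intro m h1 h2; simp [pvProbeOps]; omega
  | succ fuel ih =>
      intro m h1 h2
      rw [pvProbeOps]
      by_cases hm : m < N
      · rw [if_pos (by have := hcont m hm; exact_mod_cast this)]
        exact ih (m + 1) (by omega) (by omega)
      · have hmN : m = N := by omega
        subst hmN
        rw [if_neg (by rw [hstop]; simp)]

-- ===== VERDICT (by name: the statement is the Claim_ definition above) =====
lemma pv_main (architecture : List (String × String))
    (hpre : Pre_infer_num_vertices architecture) :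
    infer_num_vertices architecture = infer_num_vertices_alt architecture := by
  unfold Pre_infer_num_vertices at hpre
  unfold infer_num_vertices infer_num_vertices_alt
  have hknd : (PySem.Dict.ofList architecture).keys.Nodup := PySem.Dict.nodup_keys_ofList architecture
  have hFnd : ((PySem.Dict.ofList architecture).keys.filter
      (fun k => PySem.Str.startswith k "op")).Nodup := hknd.filter _
  have hinj : Function.Injective (fun i : Nat => pvOpKey ((i : Int) + 1)) :=
    fun i j h => pv_opKey_inj h
  have hSnd : (((List.range (((PySem.Dict.ofList architecture).keys.filter
      (fun k => PySem.Str.startswith k "op")).length)).map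
      (fun i : Nat => pvOpKey ((i : Int) + 1)))).Nodup :=
    (List.nodup_range).map hinj
  -- every op-prefixed key is in S, and |F| = |S|, so S ⊆ F
  have hFS : ((PySem.Dict.ofList architecture).keys.filter (fun k => PySem.Str.startswith k "op"))
      ⊆ (List.range (((PySem.Dict.ofList architecture).keys.filter
          (fun k => PySem.Str.startswith k "op")).length)).map (fun i : Nat => pvOpKey ((i : Int) + 1)) := by
    intro k hk
    rw [List.mem_filter] at hk
    obtain ⟨i, hi, hk2⟩ := hpre k hk.1 hk.2
    exact List.mem_map.mpr ⟨i, hi, hk2.symm⟩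
  have hperm : ((PySem.Dict.ofList architecture).keys.filter (fun k => PySem.Str.startswith k "op")).Perm
      ((List.range (((PySem.Dict.ofList architecture).keys.filter
          (fun k => PySem.Str.startswith k "op")).length)).map (fun i : Nat => pvOpKey ((i : Int) + 1))) :=
    (hFnd.subperm hFS).perm_of_length_le (by simp)
  have hcont : ∀ j : Nat,
      j < ((PySem.Dict.ofList architecture).keys.filter (fun k => PySem.Str.startswith k "op")).length →
      (PySem.Dict.ofList architecture).contains (pvOpKey ((j : Int) + 1)) = true := by
    intro j hj
    have hmemS : pvOpKey ((j : Int) + 1) ∈ (List.range (((PySem.Dict.ofList architecture).keys.filter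
        (fun k => PySem.Str.startswith k "op")).length)).map (fun i : Nat => pvOpKey ((i : Int) + 1)) :=
      List.mem_map.mpr ⟨j, List.mem_range.mpr hj, rfl⟩
    have hmemF := hperm.symm.subset hmemS
    rw [List.mem_filter] at hmemF
    exact (PySem.Dict.contains_iff_mem_keys _ _).mpr hmemF.1
  have hstop : (PySem.Dict.ofList architecture).contains
      (pvOpKey ((((PySem.Dict.ofList architecture).keys.filter
        (fun k => PySem.Str.startswith k "op")).length : Int) + 1)) = false := by
    by_contra hc
    have hc2 : (PySem.Dict.ofList architecture).contains
        (pvOpKey ((((PySem.Dict.ofList architecture).keys.filter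
          (fun k => PySem.Str.startswith k "op")).length : Int) + 1)) = true := by
      revert hc; cases (PySem.Dict.ofList architecture).contains
        (pvOpKey ((((PySem.Dict.ofList architecture).keys.filter
          (fun k => PySem.Str.startswith k "op")).length : Int) + 1)) <;> simp
    have hmem := (PySem.Dict.contains_iff_mem_keys _ _).mp hc2
    obtain ⟨i, hi, heq⟩ := hpre _ hmem (pv_opKey_startswith _)
    have := pv_opKey_inj heq
    rw [List.mem_range] at hi
    omega
  have hlen : ((PySem.Dict.ofList architecture).keys.filter
      (fun k => PySem.Str.startswith k "op")).length ≤ (PySem.Dict.ofList architecture).size := by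
    calc ((PySem.Dict.ofList architecture).keys.filter (fun k => PySem.Str.startswith k "op")).length
        ≤ (PySem.Dict.ofList architecture).keys.length := List.length_filter_le _ _
      _ = (PySem.Dict.ofList architecture).size := by
          simp [PySem.Dict.keys, PySem.Dict.size]
  have hprobe := pv_probe_eq (PySem.Dict.ofList architecture) _ hcont hstop
    (PySem.Dict.ofList architecture).size 0 (Nat.zero_le _) (by omega)
  dsimp only
  rw [hprobe, PySem.Set.ofList_eq_self_of_nodup _ hFnd]
  simp [PySem.Set.len]

-- ===== VERDICT (by name: the statement is the Claim_ definition above) =====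
theorem infer_num_vertices_spec : Claim_equal_infer_num_vertices := by
  intro architecture _ hpre
  unfold Spec_infer_num_vertices
  exact pv_main architecture hpre
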